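-- pv_equiv track=rewrite | github.com/KrzysztofSwedziol/ASD- | ASD zadania z egzaminów/Optimal Sum/zad2.py | opt_sum
-- ===== SOURCE A (Python) =====
-- from math import inf
--
-- def opt_sum(tab):
--     n = len(tab)
--     sums = [inf for i in range(n)]
--     sums[0] = tab[0]
--     for i in range(1, n):
--         sums[i] = sums[i-1] + tab[i]
--
--     memo = [[0 for i in range(n)] for j in range(n)]
--     memo[0][0] = tab[0]
--
--     for j in range(1, n):
--         for i in range(n-1, -1, -1):
--             if i == j:
--                 memo[i][j] = tab[i]
--             if i > j:
--                 memo[i][j] = 0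
--             if i == j-1:
--                 memo[i][j] = abs(tab[i] + tab[j])
--             if i < j-1:
--                 if i > 0:
--                     memo[i][j] = max(abs(sums[j] - sums[i-1]), min(memo[i+1][j], memo[i][j-1]))
--                 else:
--                     memo[i][j] = max(abs(sums[j]), min(memo[i + 1][j], memo[i][j - 1]))
--
--
--
--     return memo[0][n-1]
-- ===== SOURCE B (Python) =====
-- def opt_sum(tab):
--     n = len(tab)
--     pref = [0]
--     for x in tab:
--         pref.append(pref[-1] + x)
--     memo = {}
--
--     def f(i, j):
--         if i > j:
--             return 0
--         if i == j:
--             return tab[i]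
--         if (i, j) not in memo:
--             memo[(i, j)] = max(abs(pref[j + 1] - pref[i]),
--                                min(f(i + 1, j), f(i, j - 1)))
--         return memo[(i, j)]
--
--     return f(0, n - 1)
-- ===== Notes on version B (the rewrite author's own statement) =====
-- stated objective: alternative
-- what changed: Replaces A's bottom-up n-by-n table fill (four-way branch chain over every cell of the matrix, inf-seeded sums array) with a top-down memoized recursion f(i,j) over interval endpoints that caches results in a dict and evaluates only the cells the recurrence actually demands.
import Mathlib
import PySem

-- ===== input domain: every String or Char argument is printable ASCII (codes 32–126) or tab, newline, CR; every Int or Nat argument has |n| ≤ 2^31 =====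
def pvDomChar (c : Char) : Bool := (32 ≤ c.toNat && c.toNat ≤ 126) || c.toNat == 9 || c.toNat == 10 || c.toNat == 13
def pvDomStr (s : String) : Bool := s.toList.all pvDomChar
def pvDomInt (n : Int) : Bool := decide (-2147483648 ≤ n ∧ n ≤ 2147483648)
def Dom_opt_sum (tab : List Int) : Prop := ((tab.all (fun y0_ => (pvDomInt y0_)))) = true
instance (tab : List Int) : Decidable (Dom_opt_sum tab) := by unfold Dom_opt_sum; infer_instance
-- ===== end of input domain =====

-- B replaces A's bottom-up n×n table fill by a top-down memoized recursion over the
-- interval endpoints (dict cache, demand-driven evaluation); same asymptotic cost.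

-- ===== PORT A =====
-- memo[i][j] read / write as 2D list operations
def pvGet2 (m : List (List Int)) (i j : Nat) : Int := (m.getD i []).getD j 0
def pvSet2 (m : List (List Int)) (i j : Nat) (v : Int) : List (List Int) :=
  m.set i ((m.getD i []).set j v)

def opt_sum (tab : List Int) : Int :=
  let n := tab.length
  -- sums = [inf]*n; the float placeholder inf is modelled by 0: for n ≥ 1 every cell is
  -- overwritten before being read, and n = 0 raises IndexError (excluded by Pre_)
  let sums := (List.range' 1 (n-1)).foldl
      (fun s i => s.set i (s.getD (i-1) 0 + tab.getD i 0))
      ((List.replicate n (0:Int)).set 0 (tab.getD 0 0))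
  let memo0 := pvSet2 (List.replicate n (List.replicate n (0:Int))) 0 0 (tab.getD 0 0)
  let memo := (List.range' 1 (n-1)).foldl (fun m j =>
      ((List.range n).reverse).foldl (fun m i =>
        let m := if i = j then pvSet2 m i j (tab.getD i 0) else m
        let m := if j < i then pvSet2 m i j 0 else m
        let m := if i = j - 1 then pvSet2 m i j |tab.getD i 0 + tab.getD j 0| else m
        let m := if i + 1 < j then
            (if 0 < i then
              pvSet2 m i j (max |sums.getD j 0 - sums.getD (i-1) 0|
                             (min (pvGet2 m (i+1) j) (pvGet2 m i (j-1))))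
             else
              pvSet2 m i j (max |sums.getD j 0|
                             (min (pvGet2 m (i+1) j) (pvGet2 m i (j-1)))))
          else m
        m) m) memo0
  pvGet2 memo 0 (n-1)

-- ===== PORT B =====
-- the inner function f(i, j): returns its value together with the updated memo dict.
-- fuel is a structural-recursion bound only (each call shrinks j - i, so fuel = n always
-- suffices and the fuel-0 fallback is never reached); it makes the port kernel-evaluable.
def pvF (tab : List Int) (pref : List Int) :
    Nat → Int → Int → PySem.Dict (Int × Int) Int → Int × PySem.Dict (Int × Int) Int
  | fuel, i, j, memo =>
    if i > j then (0, memo)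
    else if i = j then (tab.getD i.toNat 0, memo)
    else
      match fuel with
      | 0 => (0, memo)  -- unreachable: fuel ≥ j - i throughout (proved in pvF_spec)
      | fuel + 1 =>
        match memo.get? (i, j) with
        | some v => (v, memo)
        | none =>
          let p1 := pvF tab pref fuel (i+1) j memo
          let p2 := pvF tab pref fuel i (j-1) p1.2
          let v := max |pref.getD (j+1).toNat 0 - pref.getD i.toNat 0| (min p1.1 p2.1)
          (v, p2.2.insert (i, j) v)

def opt_sum_alt (tab : List Int) : Int :=
  let n := tab.length
  let pref := tab.foldl (fun p x => p ++ [p.getD (p.length - 1) 0 + x]) [(0:Int)]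
  (pvF tab pref n 0 ((n : Int) - 1) PySem.Dict.empty).1

-- ===== PRECONDITION & SPEC =====
-- Pre_ excludes only the empty list, on which A raises IndexError (tab[0]).
def Pre_opt_sum (tab : List Int) : Prop := tab ≠ []
instance (tab : List Int) : Decidable (Pre_opt_sum tab) := by unfold Pre_opt_sum; infer_instance
def pvWitness_opt_sum : List Int := [1, -2, 3]

def Spec_opt_sum (tab : List Int) (out : Int) : Prop := out = opt_sum_alt tab
instance (tab : List Int) (out : Int) : Decidable (Spec_opt_sum tab out) := by unfold Spec_opt_sum; infer_instance

-- ===== CLAIM (what is proved, stated in full; the proofs are below) =====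
def Claim_equal_opt_sum : Prop := ∀ (tab : List Int), Dom_opt_sum tab → Pre_opt_sum tab → Spec_opt_sum tab (opt_sum tab)

-- ===== LEMMAS AND PROOFS =====

-- the common recurrence both programs compute: value of the interval game on tab[i..j]
def pvSpec (tab : List Int) (i j : Nat) : Int :=
  if _h1 : i = j then tab.getD i 0
  else if _h2 : j < i then 0
  else max |(tab.take (j+1)).sum - (tab.take i).sum|
         (min (pvSpec tab (i+1) j) (pvSpec tab i (j-1)))
termination_by 2*j - i
decreasing_by all_goals omega

lemma pvSpec_diag (tab : List Int) (i : Nat) : pvSpec tab i i = tab.getD i 0 := by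
  rw [pvSpec]; simp

lemma pvSpec_gt (tab : List Int) {i j : Nat} (h : j < i) : pvSpec tab i j = 0 := by
  rw [pvSpec]; rw [dif_neg (by omega), dif_pos h]

lemma pvSpec_lt (tab : List Int) {i j : Nat} (h : i < j) :
    pvSpec tab i j = max |(tab.take (j+1)).sum - (tab.take i).sum|
      (min (pvSpec tab (i+1) j) (pvSpec tab i (j-1))) := by
  rw [pvSpec]; rw [dif_neg (by omega), dif_neg (by omega)]

lemma pv_take_succ (tab : List Int) {k : Nat} (h : k < tab.length) :
    (tab.take (k+1)).sum = (tab.take k).sum + tab.getD k 0 := by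
  rw [List.sum_take_succ _ _ h, List.getD_eq_getElem _ _ h]

lemma pv_max_abs_min (a b : Int) : max |a+b| (min a b) = |a+b| := by
  rcases abs_cases (a+b) with ⟨h,_⟩|⟨h,_⟩ <;> rw [h] <;> omega

-- the adjacent-pair cell of A equals the uniform recurrence
lemma pvSpec_pred (tab : List Int) {j : Nat} (h1 : 1 ≤ j) (h2 : j < tab.length) :
    pvSpec tab (j-1) j = |tab.getD (j-1) 0 + tab.getD j 0| := by
  have h3 : j - 1 < j := by omega
  rw [pvSpec_lt tab h3]
  have e1 : j - 1 + 1 = j := by omega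
  rw [e1, pvSpec_diag, pvSpec_diag]
  have t1 : (tab.take (j+1)).sum = (tab.take j).sum + tab.getD j 0 := pv_take_succ tab h2
  have t2 : (tab.take j).sum = (tab.take (j-1)).sum + tab.getD (j-1) 0 := by
    have := pv_take_succ tab (k := j-1) (by omega)
    rwa [e1] at this
  have : (tab.take (j+1)).sum - (tab.take (j-1)).sum = tab.getD (j-1) 0 + tab.getD j 0 := by
    omega
  rw [this, min_comm, pv_max_abs_min]

lemma pv_getD_set {α : Type} (l : List α) (i j : Nat) (a : α) {d : α} :
    (l.set i a).getD j d = if i = j ∧ i < l.length then a else l.getD j d := by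
  simp only [List.getD, List.getElem?_set]
  split
  · rename_i h; subst h; split <;> simp_all
  · simp_all

-- ----- prefix sums -----

-- A's sums array: sums.getD k 0 = (tab.take (k+1)).sum for k below the processed bound
lemma pvA_sums (tab : List Int) (h0 : tab ≠ []) :
    ∀ m, m ≤ tab.length - 1 →
      (((List.range' 1 m).foldl
        (fun s i => s.set i (s.getD (i-1) 0 + tab.getD i 0))
        ((List.replicate tab.length (0:Int)).set 0 (tab.getD 0 0))).length = tab.length ∧
      ∀ k, k ≤ m → ((List.range' 1 m).foldl
        (fun s i => s.set i (s.getD (i-1) 0 + tab.getD i 0))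
        ((List.replicate tab.length (0:Int)).set 0 (tab.getD 0 0))).getD k 0
          = (tab.take (k+1)).sum) := by
  have hn : 1 ≤ tab.length := List.length_pos_of_ne_nil h0
  intro m
  induction m with
  | zero =>
    intro _
    constructor
    · simp
    · intro k hk
      interval_cases k
      simp only [List.range'_zero, List.foldl_nil]
      rw [pv_getD_set]
      simp only [List.length_replicate]
      rw [if_pos ⟨trivial, hn⟩]
      have := pv_take_succ tab (k := 0) (by omega)
      simpa using this.symm
  | succ m ih =>
    intro hm
    obtain ⟨ihl, ihv⟩ := ih (by omega)
    rw [List.range'_1_concat, List.foldl_append]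
    simp only [List.foldl_cons, List.foldl_nil, show 1 + m = m + 1 from by omega,
      Nat.add_sub_cancel]
    constructor
    · rw [List.length_set]; exact ihl
    · intro k hk
      rw [pv_getD_set]
      by_cases hke : m + 1 = k
      · rw [if_pos ⟨hke, by omega⟩]
        rw [ihv m (by omega)]
        have := pv_take_succ tab (k := m+1) (by omega)
        subst hke
        omega
      · rw [if_neg (by tauto)]
        exact ihv k (by omega)

-- B's pref list equals [0] followed by running sums
def pvScan (c : Int) : List Int → List Int
  | [] => []
  | x :: l => (c+x) :: pvScan (c+x) l

lemma pvB_pref_shape : ∀ (l init : List Int) (c : Int),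
    l.foldl (fun p x => p ++ [p.getD (p.length - 1) 0 + x]) (init ++ [c])
      = (init ++ [c]) ++ pvScan c l := by
  intro l
  induction l with
  | nil => intro init c; simp [pvScan]
  | cons x l ih =>
    intro init c
    have hlast : (init ++ [c]).getD ((init ++ [c]).length - 1) 0 = c := by
      simp [List.getD]
    simp only [List.foldl_cons, hlast, pvScan]
    rw [ih (init ++ [c]) (c + x)]
    simp

lemma pvScan_getD :
    ∀ (l : List Int) (c : Int) (m : Nat), m < l.length →
      (pvScan c l).getD m 0 = c + (l.take (m+1)).sum := by
  intro l
  induction l with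
  | nil => intro c m h; simp at h
  | cons x l ih =>
    intro c m h
    cases m with
    | zero => simp [pvScan]
    | succ m =>
      simp only [pvScan, List.getD_cons_succ, List.take_succ_cons, List.sum_cons]
      rw [ih (c + x) m (by simpa using h)]
      ring

lemma pvB_pref (tab : List Int) :
    ∀ k, k ≤ tab.length →
      (tab.foldl (fun p x => p ++ [p.getD (p.length - 1) 0 + x]) [(0:Int)]).getD k 0
        = (tab.take k).sum := by
  intro k hk
  have hshape := pvB_pref_shape tab [] 0
  simp only [List.nil_append] at hshape
  rw [hshape]
  cases k with
  | zero => simp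
  | succ m =>
    have hm : m < tab.length := by omega
    have : ([(0:Int)] ++ pvScan 0 tab).getD (m+1) 0 = (pvScan 0 tab).getD m 0 := by
      simp [List.getD]
    rw [this, pvScan_getD tab 0 m hm]
    simp [List.take_add_one]

-- ----- B's memoized recursion -----

-- every cached value is the recurrence's value at its key
def pvInv (tab : List Int) (memo : PySem.Dict (Int × Int) Int) : Prop :=
  ∀ (a b : Nat) (v : Int), memo.get? ((a : Int), (b : Int)) = some v → v = pvSpec tab a b

lemma pvF_spec (tab pref : List Int)
    (hp : ∀ k, k ≤ tab.length → pref.getD k 0 = (tab.take k).sum) :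
    ∀ (d : Nat) (i j : Nat), j - i ≤ d → i ≤ j → j < tab.length →
      ∀ memo, pvInv tab memo →
        (pvF tab pref d (i : Int) (j : Int) memo).1 = pvSpec tab i j ∧
        pvInv tab (pvF tab pref d (i : Int) (j : Int) memo).2 := by
  intro d
  induction d with
  | zero =>
    intro i j hd hij hjn memo hinv
    have hij' : i = j := by omega
    subst hij'
    rw [pvF]
    rw [if_neg (by omega), if_pos rfl]
    constructor
    · simp [pvSpec_diag]
    · exact hinv
  | succ d ih =>
    intro i j hd hij hjn memo hinv
    by_cases hij' : i = j
    · subst hij'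
      rw [pvF, if_neg (by omega), if_pos rfl]
      constructor
      · simp [pvSpec_diag]
      · exact hinv
    · have hlt : i < j := by omega
      rw [pvF, if_neg (by omega), if_neg (by exact_mod_cast hij')]
      cases hm : memo.get? ((i : Int), (j : Int)) with
      | some v =>
        exact ⟨hinv i j v hm, hinv⟩
      | none =>
        simp only []
        have e1 : (i : Int) + 1 = ((i + 1 : Nat) : Int) := by push_cast; ring
        have e2 : (j : Int) - 1 = ((j - 1 : Nat) : Int) := by omega
        have h1 := ih (i+1) j (by omega) (by omega) hjn memo hinv
        rw [← e1] at h1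
        have h2 := ih i (j-1) (by omega) (by omega) (by omega) _ h1.2
        rw [← e2] at h2
        have et1 : ((j : Int) + 1).toNat = j + 1 := by omega
        have et2 : ((i : Int)).toNat = i := by omega
        have hv : max |pref.getD ((j : Int) + 1).toNat 0 - pref.getD ((i : Int)).toNat 0|
            (min (pvF tab pref d ((i : Int)+1) (j : Int) memo).1
                 (pvF tab pref d (i : Int) ((j : Int)-1) (pvF tab pref d ((i : Int)+1) (j : Int) memo).2).1)
            = pvSpec tab i j := by
          rw [et1, et2, hp (j+1) (by omega), hp i (by omega), h1.1, h2.1,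
            pvSpec_lt tab hlt]
        refine ⟨hv, ?_⟩
        intro a b w hw
        rw [PySem.Dict.get?_insert] at hw
        by_cases hk : ((a : Int), (b : Int)) = ((i : Int), (j : Int))
        · rw [if_pos hk] at hw
          have ha : a = i := by
            have := congrArg Prod.fst hk; simpa using this
          have hb : b = j := by
            have := congrArg Prod.snd hk; simpa using this
          subst ha; subst hb
          rw [← hv]
          exact (Option.some_inj.mp hw).symm
        · rw [if_neg hk] at hw
          exact h2.2 a b w hw

lemma pvB_eq_spec (tab : List Int) (h0 : tab ≠ []) :
    opt_sum_alt tab = pvSpec tab 0 (tab.length - 1) := by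
  have hn : 1 ≤ tab.length := List.length_pos_of_ne_nil h0
  have hp := pvB_pref tab
  have hemp : pvInv tab PySem.Dict.empty := by
    intro a b v hv
    simp [PySem.Dict.get?_empty] at hv
  have e : ((tab.length : Int)) - 1 = ((tab.length - 1 : Nat) : Int) := by omega
  have h := pvF_spec tab _ hp tab.length 0 (tab.length - 1)
    (by omega) (by omega) (by omega) PySem.Dict.empty hemp
  simp only [opt_sum_alt]
  rw [e]
  exact_mod_cast h.1

-- ----- A's memo invariant -----

lemma pv_row_len (tab : List Int) {m : List (List Int)} (hl : m.length = tab.length)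
    (hr : ∀ r ∈ m, r.length = tab.length) {i : Nat} (hi : i < tab.length) :
    (m.getD i []).length = tab.length := by
  rw [List.getD_eq_getElem m [] (by omega)]
  exact hr _ (List.getElem_mem _)

lemma pv_get2_set2 (tab : List Int) {m : List (List Int)} (hl : m.length = tab.length)
    (hr : ∀ r ∈ m, r.length = tab.length) {i j : Nat} (hi : i < tab.length)
    (hj : j < tab.length) (v : Int) (i' j' : Nat) :
    pvGet2 (pvSet2 m i j v) i' j' = if i = i' ∧ j = j' then v else pvGet2 m i' j' := by
  have hrow := pv_row_len tab hl hr hi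
  unfold pvGet2 pvSet2
  rw [pv_getD_set]
  by_cases hii : i = i'
  · subst hii
    rw [if_pos ⟨rfl, by omega⟩, pv_getD_set, hrow]
    by_cases hjj : j = j'
    · subst hjj; rw [if_pos ⟨rfl, hj⟩, if_pos ⟨rfl, rfl⟩]
    · rw [if_neg (by tauto), if_neg (by tauto)]
  · rw [if_neg (by tauto), if_neg (by tauto)]

lemma pv_set2_len (m : List (List Int)) (i j : Nat) (v : Int) :
    (pvSet2 m i j v).length = m.length := by
  unfold pvSet2; rw [List.length_set]

lemma pv_set2_rows (tab : List Int) {m : List (List Int)} (hl : m.length = tab.length)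
    (hr : ∀ r ∈ m, r.length = tab.length) {i : Nat} (hi : i < tab.length) (j : Nat) (v : Int) :
    ∀ r ∈ pvSet2 m i j v, r.length = tab.length := by
  intro r hmem
  rcases List.mem_or_eq_of_mem_set hmem with h | h
  · exact hr r h
  · rw [h, List.length_set]; exact pv_row_len tab hl hr hi

def pvMInv (tab : List Int) (m : List (List Int)) (j : Nat) : Prop :=
  m.length = tab.length ∧ (∀ r ∈ m, r.length = tab.length) ∧
  ∀ i j', i < tab.length → j' < tab.length →
    pvGet2 m i j' = if j' ≤ j then pvSpec tab i j' else 0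

-- invariant of A's inner (descending-i) loop: columns < j are finished, column j is
-- finished from row k upward, everything to the right is still 0
def pvAInv (tab : List Int) (m : List (List Int)) (j k : Nat) : Prop :=
  m.length = tab.length ∧ (∀ r ∈ m, r.length = tab.length) ∧
  ∀ i' j', i' < tab.length → j' < tab.length →
    pvGet2 m i' j' = if j' < j then pvSpec tab i' j'
      else if j' = j ∧ k ≤ i' then pvSpec tab i' j' else 0

lemma pvA_step (tab : List Int) (sums : List Int)
    (hs : ∀ k, k < tab.length → sums.getD k 0 = (tab.take (k+1)).sum)
    {j k : Nat} (hj1 : 1 ≤ j) (hjn : j < tab.length) (hk : k < tab.length)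
    (m : List (List Int)) (hinv : pvAInv tab m j (k+1)) :
    pvAInv tab ((fun m i =>
        let m := if i = j then pvSet2 m i j (tab.getD i 0) else m
        let m := if j < i then pvSet2 m i j 0 else m
        let m := if i = j - 1 then pvSet2 m i j |tab.getD i 0 + tab.getD j 0| else m
        let m := if i + 1 < j then
            (if 0 < i then
              pvSet2 m i j (max |sums.getD j 0 - sums.getD (i-1) 0|
                             (min (pvGet2 m (i+1) j) (pvGet2 m i (j-1))))
             else
              pvSet2 m i j (max |sums.getD j 0|
                             (min (pvGet2 m (i+1) j) (pvGet2 m i (j-1)))))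
          else m
        m) m k) j k := by
  obtain ⟨hl, hr, hv⟩ := hinv
  have hset : ∀ v : Int, v = pvSpec tab k j → pvAInv tab (pvSet2 m k j v) j k := by
    intro v hval
    refine ⟨by rw [pv_set2_len]; exact hl, pv_set2_rows tab hl hr hk j v, ?_⟩
    intro i' j' hi' hj'
    rw [pv_get2_set2 tab hl hr hk hjn v i' j']
    by_cases hhit : k = i' ∧ j = j'
    · obtain ⟨h1, h2⟩ := hhit; subst h1; subst h2
      rw [if_pos ⟨rfl, rfl⟩, if_neg (by omega), if_pos ⟨rfl, le_refl _⟩, hval]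
    · rw [if_neg hhit, hv i' j' hi' hj']
      by_cases hlt : j' < j
      · rw [if_pos hlt, if_pos hlt]
      · rw [if_neg hlt, if_neg hlt]
        by_cases hj'j : j' = j
        · subst hj'j
          by_cases hki : k + 1 ≤ i'
          · rw [if_pos ⟨rfl, hki⟩, if_pos ⟨rfl, by omega⟩]
          · rw [if_neg (by omega), if_neg (by
              rintro ⟨-, hke⟩
              exact hhit ⟨by omega, rfl⟩)]
        · rw [if_neg (by tauto), if_neg (by tauto)]
  rcases Nat.lt_trichotomy k j with hlt | heq | hgt
  · rcases Nat.lt_or_ge (k+1) j with hlt2 | hge2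
    · -- i < j-1 : the general cell
      simp only [if_neg (show ¬ k = j by omega), if_neg (show ¬ j < k by omega),
        if_neg (show ¬ k = j - 1 by omega), if_pos hlt2]
      have hg1 : pvGet2 m (k+1) j = pvSpec tab (k+1) j := by
        rw [hv (k+1) j (by omega) hjn, if_neg (by omega), if_pos ⟨rfl, le_refl _⟩]
      have hg2 : pvGet2 m k (j-1) = pvSpec tab k (j-1) := by
        rw [hv k (j-1) hk (by omega), if_pos (by omega)]
      have hsj : sums.getD j 0 = (tab.take (j+1)).sum := hs j hjn
      by_cases hk0 : 0 < k
      · rw [if_pos hk0]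
        apply hset
        rw [hg1, hg2, hsj, hs (k-1) (by omega), show k - 1 + 1 = k from by omega]
        exact (pvSpec_lt tab hlt).symm
      · rw [if_neg hk0]
        apply hset
        have hk0' : k = 0 := by omega
        subst hk0'
        rw [hg1, hg2, hsj]
        rw [pvSpec_lt tab hlt]
        simp
    · -- i = j-1 : the adjacent pair
      have hke : k = j - 1 := by omega
      simp only [if_neg (show ¬ k = j by omega), if_neg (show ¬ j < k by omega),
        if_pos hke, if_neg (show ¬ k + 1 < j by omega)]
      apply hset
      rw [hke, pvSpec_pred tab hj1 hjn]
  · -- i = j : the diagonal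
    simp only [if_pos heq, if_neg (show ¬ j < k by omega),
      if_neg (show ¬ k = j - 1 by omega), if_neg (show ¬ k + 1 < j by omega)]
    apply hset
    rw [heq, pvSpec_diag]
  · -- i > j : below the diagonal
    simp only [if_neg (show ¬ k = j by omega), if_pos hgt,
      if_neg (show ¬ k = j - 1 by omega), if_neg (show ¬ k + 1 < j by omega)]
    apply hset
    rw [pvSpec_gt tab hgt]

lemma pvA_inner (tab : List Int) (sums : List Int)
    (hs : ∀ k, k < tab.length → sums.getD k 0 = (tab.take (k+1)).sum)
    {j : Nat} (hj1 : 1 ≤ j) (hjn : j < tab.length) :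
    ∀ k, k ≤ tab.length → ∀ m : List (List Int), pvAInv tab m j k →
      pvAInv tab ((List.range k).reverse.foldl (fun m i =>
        let m := if i = j then pvSet2 m i j (tab.getD i 0) else m
        let m := if j < i then pvSet2 m i j 0 else m
        let m := if i = j - 1 then pvSet2 m i j |tab.getD i 0 + tab.getD j 0| else m
        let m := if i + 1 < j then
            (if 0 < i then
              pvSet2 m i j (max |sums.getD j 0 - sums.getD (i-1) 0|
                             (min (pvGet2 m (i+1) j) (pvGet2 m i (j-1))))
             else
              pvSet2 m i j (max |sums.getD j 0|
                             (min (pvGet2 m (i+1) j) (pvGet2 m i (j-1)))))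
          else m
        m) m) j 0 := by
  intro k
  induction k with
  | zero =>
    intro _ m hinv
    simpa using hinv
  | succ k ih =>
    intro hk m hinv
    rw [List.range_succ]
    simp only [List.reverse_append, List.reverse_cons, List.reverse_nil, List.nil_append,
      List.cons_append, List.foldl_cons]
    exact ih (by omega) _ (pvA_step tab sums hs hj1 hjn (by omega) m hinv)

lemma pv_MInv_to_AInv (tab : List Int) {M : List (List Int)} {j : Nat}
    (h : pvMInv tab M j) : pvAInv tab M (j+1) tab.length := by
  obtain ⟨hl, hr, hv⟩ := h
  refine ⟨hl, hr, ?_⟩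
  intro i' j' hi' hj'
  rw [hv i' j' hi' hj']
  by_cases hlt : j' < j + 1
  · rw [if_pos (by omega), if_pos hlt]
  · rw [if_neg (by omega), if_neg hlt, if_neg (by omega)]

lemma pv_AInv_to_MInv (tab : List Int) {M : List (List Int)} {j : Nat}
    (h : pvAInv tab M j 0) : pvMInv tab M j := by
  obtain ⟨hl, hr, hv⟩ := h
  refine ⟨hl, hr, ?_⟩
  intro i' j' hi' hj'
  rw [hv i' j' hi' hj']
  by_cases hlt : j' < j
  · rw [if_pos hlt, if_pos (by omega)]
  · by_cases hje : j' = j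
    · rw [if_neg hlt, if_pos ⟨hje, by omega⟩, if_pos (by omega)]
    · rw [if_neg hlt, if_neg (by tauto), if_neg (by omega)]

lemma pvA_outer (tab : List Int) (h0 : tab ≠ []) (sums : List Int)
    (hs : ∀ k, k < tab.length → sums.getD k 0 = (tab.take (k+1)).sum) :
    ∀ m, m ≤ tab.length - 1 →
      pvMInv tab ((List.range' 1 m).foldl (fun mm j =>
        ((List.range tab.length).reverse).foldl (fun m i =>
          let m := if i = j then pvSet2 m i j (tab.getD i 0) else m
          let m := if j < i then pvSet2 m i j 0 else m
          let m := if i = j - 1 then pvSet2 m i j |tab.getD i 0 + tab.getD j 0| else m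
          let m := if i + 1 < j then
              (if 0 < i then
                pvSet2 m i j (max |sums.getD j 0 - sums.getD (i-1) 0|
                               (min (pvGet2 m (i+1) j) (pvGet2 m i (j-1))))
               else
                pvSet2 m i j (max |sums.getD j 0|
                               (min (pvGet2 m (i+1) j) (pvGet2 m i (j-1)))))
            else m
          m) mm)
        (pvSet2 (List.replicate tab.length (List.replicate tab.length (0:Int))) 0 0 (tab.getD 0 0))) m := by
  have hn : 1 ≤ tab.length := List.length_pos_of_ne_nil h0
  have hl0 : (List.replicate tab.length (List.replicate tab.length (0:Int))).length = tab.length := by simp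
  have hr0 : ∀ r ∈ List.replicate tab.length (List.replicate tab.length (0:Int)),
      r.length = tab.length := by
    intro r hmem; rw [List.eq_of_mem_replicate hmem]; simp
  intro m
  induction m with
  | zero =>
    intro _
    simp only [List.range'_zero, List.foldl_nil]
    refine ⟨by rw [pv_set2_len]; exact hl0, pv_set2_rows tab hl0 hr0 (by omega) 0 _, ?_⟩
    intro i j' hi hj'
    rw [pv_get2_set2 tab hl0 hr0 (by omega) (by omega) _ i j']
    by_cases hhit : 0 = i ∧ 0 = j'
    · obtain ⟨h1, h2⟩ := hhit; subst h1; subst h2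
      rw [if_pos ⟨rfl, rfl⟩, if_pos (by omega), pvSpec_diag]
    · rw [if_neg hhit]
      have hz : pvGet2 (List.replicate tab.length (List.replicate tab.length (0:Int))) i j' = 0 := by
        unfold pvGet2
        rw [List.getD_replicate _ hi, List.getD_replicate _ hj']
      rw [hz]
      by_cases hj0 : j' ≤ 0
      · have : j' = 0 := by omega
        subst this
        have : 0 < i := by omega
        rw [if_pos (le_refl _), pvSpec_gt tab this]
      · rw [if_neg hj0]
  | succ m ih =>
    intro hm
    rw [List.range'_1_concat, List.foldl_append]
    simp only [List.foldl_cons, List.foldl_nil, show 1 + m = m + 1 from by omega]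
    exact pv_AInv_to_MInv tab
      (pvA_inner tab sums hs (by omega) (by omega) tab.length (le_refl _) _
        (pv_MInv_to_AInv tab (ih (by omega))))

lemma pvA_eq_spec (tab : List Int) (h0 : tab ≠ []) :
    opt_sum tab = pvSpec tab 0 (tab.length - 1) := by
  have hn : 1 ≤ tab.length := List.length_pos_of_ne_nil h0
  have hs := pvA_sums tab h0 (tab.length - 1) (le_refl _)
  have hs' : ∀ k, k < tab.length →
      ((List.range' 1 (tab.length - 1)).foldl
        (fun s i => s.set i (s.getD (i-1) 0 + tab.getD i 0))
        ((List.replicate tab.length (0:Int)).set 0 (tab.getD 0 0))).getD k 0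
        = (tab.take (k+1)).sum := fun k hk => hs.2 k (by omega)
  have h := pvA_outer tab h0 _ hs' (tab.length - 1) (le_refl _)
  obtain ⟨-, -, hv⟩ := h
  simp only [opt_sum]
  rw [hv 0 (tab.length - 1) (by omega) (by omega), if_pos (le_refl _)]

-- ===== VERDICT (by name: the statement is the Claim_ definition above) =====
theorem opt_sum_spec : Claim_equal_opt_sum := by
  intro tab _ hpre
  unfold Spec_opt_sum
  rw [pvA_eq_spec tab hpre, pvB_eq_spec tab hpre]
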